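-- pv_equiv track=rewrite | github.com/gogrean/elect2016 | code/utils.py | is_copy_paste
-- ===== SOURCE A (Python) =====
-- def is_copy_paste(text):
--     if '"@' in text:
--         return True
--
--     in_quotes = False
--     seen_quotes = 0
--     saw_at = False
--     for c in text:
--         if c == '"':
--             in_quotes = not in_quotes
--             if saw_at:
--                 seen_quotes += 1
--         if c == '@' and not in_quotes:
--             saw_at = True
--
--     return saw_at and seen_quotes % 2 == 1
-- ===== SOURCE B (Python) =====
-- def is_copy_paste(text):
--     if '"@' in text:
--         return True
--
--     # pass 1: locate the first '@' that is outside quotes, break immediately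
--     in_quotes = False
--     at_pos = None
--     for i, c in enumerate(text):
--         if c == '"':
--             in_quotes = not in_quotes
--         elif c == '@' and not in_quotes:
--             at_pos = i
--             break
--     if at_pos is None:
--         return False
--
--     # pass 2: parity of the quotes strictly after that '@'
--     return sum(1 for c in text[at_pos + 1:] if c == '"') % 2 == 1
-- ===== Notes on version B (the rewrite author's own statement) =====
-- stated objective: alternative
-- what changed: A's single interleaved scan carrying (in_quotes, seen_quotes, saw_at) is split into a locate pass that breaks at the first unquoted '@' and a separate parity tally of the quotes after that position.
import Mathlib
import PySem

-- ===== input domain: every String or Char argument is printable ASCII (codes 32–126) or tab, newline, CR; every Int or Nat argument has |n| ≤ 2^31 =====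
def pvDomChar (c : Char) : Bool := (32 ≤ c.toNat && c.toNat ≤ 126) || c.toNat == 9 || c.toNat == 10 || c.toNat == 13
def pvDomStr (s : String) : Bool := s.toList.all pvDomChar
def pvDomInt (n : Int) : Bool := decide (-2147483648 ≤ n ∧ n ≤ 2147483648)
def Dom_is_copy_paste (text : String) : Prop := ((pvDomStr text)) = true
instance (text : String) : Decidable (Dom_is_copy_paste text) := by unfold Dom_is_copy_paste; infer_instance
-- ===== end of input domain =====

-- B splits A's single interleaved (in_quotes, seen_quotes, saw_at) scan into a locate pass
-- (first unquoted '@', breaking early) plus a separate quote-parity tally of the suffix; alternative decomposition, same cost.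

-- ===== PORT A =====
-- one step of A's for-loop over the state (in_quotes, seen_quotes, saw_at)
def pvStepA (s : Bool × Nat × Bool) (c : Char) : Bool × Nat × Bool :=
  let inq := if c = '"' then !s.1 else s.1
  let seen := if c = '"' ∧ s.2.2 = true then s.2.1 + 1 else s.2.1
  let saw := if c = '@' ∧ inq = false then true else s.2.2
  (inq, seen, saw)

def is_copy_paste (text : String) : Bool :=
  if PySem.Str.isIn "\"@" text = true then true
  else
    let st := text.toList.foldl pvStepA (false, 0, false)
    st.2.2 && decide (st.2.1 % 2 = 1)

-- ===== PORT B =====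
-- pass 1 of Source B: index of the first '@' seen while not in quotes (the loop breaks there)
def pvLocate (l : List Char) (i : Nat) (q : Bool) : Option Nat :=
  match l with
  | [] => none
  | c :: rest =>
    if c = '"' then pvLocate rest (i + 1) (!q)
    else if c = '@' ∧ q = false then some i
    else pvLocate rest (i + 1) q

def is_copy_paste_alt (text : String) : Bool :=
  if PySem.Str.isIn "\"@" text = true then true
  else
    match pvLocate text.toList 0 false with
    | none => false
    | some k =>
      decide (((PySem.List.slice text.toList (some ((k : Int) + 1)) none).countP
        (fun c => c == '"')) % 2 = 1)

-- ===== PRECONDITION & SPEC =====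
def Spec_is_copy_paste (text : String) (out : Bool) : Prop := out = is_copy_paste_alt text
instance (text : String) (out : Bool) : Decidable (Spec_is_copy_paste text out) := by unfold Spec_is_copy_paste; infer_instance

-- ===== CLAIM (what is proved, stated in full; the proofs are below) =====
def Claim_equal_is_copy_paste : Prop := ∀ (text : String), Dom_is_copy_paste text → Spec_is_copy_paste text (is_copy_paste text)

-- ===== LEMMAS AND PROOFS =====

-- once saw_at is true, A's loop keeps it true and counts every quote of the rest
theorem pvFoldA_saw (l : List Char) : ∀ (q : Bool) (s : Nat),
    (l.foldl pvStepA (q, s, true)).2.1 = s + l.countP (fun c => c == '"') ∧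
    (l.foldl pvStepA (q, s, true)).2.2 = true := by
  induction l with
  | nil => intro q s; simp
  | cons c rest ih =>
    intro q s
    by_cases hc : c = '"'
    · simpa [List.foldl_cons, pvStepA, hc, List.countP_cons, Nat.add_comm, Nat.add_assoc,
        Nat.add_left_comm] using ih (!q) (s + 1)
    · simpa [List.foldl_cons, pvStepA, hc, List.countP_cons] using ih _ s

-- before saw_at: A's loop result is determined by where (if anywhere) the first unquoted '@' is
theorem pvFoldA_locate (l : List Char) : ∀ (q : Bool) (i : Nat),
    (pvLocate l i q = none → (l.foldl pvStepA (q, 0, false)).2.2 = false) ∧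
    (∀ k, pvLocate l i q = some k → i ≤ k ∧
      (l.foldl pvStepA (q, 0, false)).2.2 = true ∧
      (l.foldl pvStepA (q, 0, false)).2.1 = (l.drop (k + 1 - i)).countP (fun c => c == '"')) := by
  induction l with
  | nil => intro q i; constructor
           · intro _; simp
           · intro k hk; simp [pvLocate] at hk
  | cons c rest ih =>
    intro q i
    by_cases hc : c = '"'
    · constructor
      · intro hn
        simp only [pvLocate, if_pos hc] at hn
        simpa [List.foldl_cons, pvStepA, hc] using (ih (!q) (i + 1)).1 hn
      · intro k hk
        simp only [pvLocate, if_pos hc] at hk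
        obtain ⟨hik, hsaw, hseen⟩ := (ih (!q) (i + 1)).2 k hk
        refine ⟨by omega, ?_, ?_⟩
        · simpa [List.foldl_cons, pvStepA, hc] using hsaw
        · have hdrop : (c :: rest).drop (k + 1 - i) = rest.drop (k - i) := by
            have : k + 1 - i = (k - i) + 1 := by omega
            simp [this]
          rw [hdrop]
          have : k + 1 - (i + 1) = k - i := by omega
          rw [this] at hseen
          simpa [List.foldl_cons, pvStepA, hc] using hseen
    · by_cases hat : c = '@' ∧ q = false
      · constructor
        · intro hn; simp [pvLocate, hat] at hn
        · intro k hk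
          simp only [pvLocate, if_neg hc, if_pos hat] at hk
          obtain rfl : i = k := by exact Option.some.inj hk
          refine ⟨le_refl _, ?_, ?_⟩
          · simpa [List.foldl_cons, pvStepA, hc, hat.1, hat.2] using (pvFoldA_saw rest q 0).2
          · have hdrop : (c :: rest).drop (i + 1 - i) = rest := by
              have : i + 1 - i = 1 := by omega
              simp [this]
            rw [hdrop]
            simpa [List.foldl_cons, pvStepA, hc, hat.1, hat.2] using (pvFoldA_saw rest q 0).1
      · constructor
        · intro hn
          simp only [pvLocate, if_neg hc, if_neg hat] at hn
          simpa [List.foldl_cons, pvStepA, hc, hat] using (ih q (i + 1)).1 hn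
        · intro k hk
          simp only [pvLocate, if_neg hc, if_neg hat] at hk
          obtain ⟨hik, hsaw, hseen⟩ := (ih q (i + 1)).2 k hk
          refine ⟨by omega, ?_, ?_⟩
          · simpa [List.foldl_cons, pvStepA, hc, hat] using hsaw
          · have hdrop : (c :: rest).drop (k + 1 - i) = rest.drop (k - i) := by
              have : k + 1 - i = (k - i) + 1 := by omega
              simp [this]
            rw [hdrop]
            have : k + 1 - (i + 1) = k - i := by omega
            rw [this] at hseen
            simpa [List.foldl_cons, pvStepA, hc, hat] using hseen

-- ===== VERDICT (by name: the statement is the Claim_ definition above) =====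
theorem is_copy_paste_spec : Claim_equal_is_copy_paste := by
  intro text _
  unfold Spec_is_copy_paste is_copy_paste is_copy_paste_alt
  by_cases h : PySem.Str.isIn "\"@" text = true
  · rw [if_pos h, if_pos h]
  · simp only [if_neg h]
    cases hloc : pvLocate text.toList 0 false with
    | none =>
      have hsaw := (pvFoldA_locate text.toList false 0).1 hloc
      simp [hsaw]
    | some k =>
      obtain ⟨_, hsaw, hseen⟩ := (pvFoldA_locate text.toList false 0).2 k hloc
      have hslice : PySem.List.slice text.toList (some ((k : Int) + 1)) none
          = text.toList.drop (k + 1) := by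
        have : ((k : Int) + 1) = ((k + 1 : Nat) : Int) := by push_cast; ring
        rw [this, PySem.List.slice_from_natCast]
      simp [hsaw, hseen, hslice]
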